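-- pv_equiv track=rewrite | github.com/Qenszu/workshop | python/WDI/zestaw_5/167.py | liczba_pociec
-- ===== SOURCE A (Python) =====
-- def pozycja_nastepnej_samogloski(s, start = 0):
--     for i in range(start, len(s)):
--         if s[i] in {'a', 'e', 'i', 'o', 'u'}:
--             return i
--     return -1
--
-- def liczba_pociec(s, start = 0):
--
--     if start == 0:
--         p1 = pozycja_nastepnej_samogloski(s, start)
--         if p1 < 0:
--             return 0
--
--         p2 = pozycja_nastepnej_samogloski(s, p1+1)
--         if p2 < 0:
--             return 0
--         return (p2-p1)*liczba_pociec(s, p2)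
--     #end if
--
--     else:
--         p = pozycja_nastepnej_samogloski(s, start+1)
--         if p < 0:
--             return 1
--
--         return (p-start)*liczba_pociec(s,p)
-- ===== SOURCE B (Python) =====
-- def liczba_pociec(s, start=0):
--     vowels = set('aeiou')
--     lo = 0 if start == 0 else start + 1
--     positions = [i for i in range(lo, len(s)) if s[i] in vowels]
--     if start == 0:
--         if len(positions) < 2:
--             return 0
--         prev = positions[0]
--         positions = positions[1:]
--     else:
--         if not positions:
--             return 1
--         prev = start
--     prod = 1
--     for p in positions:
--         prod *= p - prev
--         prev = p
--     return prod
-- ===== Notes on version B (the rewrite author's own statement) =====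
-- stated objective: simpler
-- what changed: Replaces A's mutual advancing recursion with a gather-then-reduce shape: one comprehension collects all vowel positions, then a single loop multiplies consecutive gaps.
-- outside the precondition, e.g. on liczba_pociec('ab', -2): A returns 0, B returns 2
import Mathlib
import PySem

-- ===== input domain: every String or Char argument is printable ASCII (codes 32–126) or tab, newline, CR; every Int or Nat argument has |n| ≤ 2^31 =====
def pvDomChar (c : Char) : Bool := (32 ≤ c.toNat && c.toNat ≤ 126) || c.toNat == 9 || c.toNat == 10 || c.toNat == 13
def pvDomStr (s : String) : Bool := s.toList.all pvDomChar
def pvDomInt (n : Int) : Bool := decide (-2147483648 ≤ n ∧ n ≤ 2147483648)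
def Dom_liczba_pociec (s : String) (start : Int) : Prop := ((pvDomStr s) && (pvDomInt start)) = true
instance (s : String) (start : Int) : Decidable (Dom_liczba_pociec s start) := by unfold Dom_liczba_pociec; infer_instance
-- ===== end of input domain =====

-- B replaces A's advancing mutual recursion by gather-then-reduce (collect all vowel
-- positions once, then one loop multiplying consecutive gaps): simpler decomposition, same O(n) cost.
-- the vowel set {'a','e','i','o','u'} used by both programs
def pvIsVowel (c : Char) : Bool := c == 'a' || c == 'e' || c == 'i' || c == 'o' || c == 'u'

-- ===== PORT A =====
-- s[i] ported as pyGet?.getD ' ': exact whenever the index is in range, which Pre_ (0 ≤ start)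
-- guarantees for every scanned index i ∈ range(start, len(s)).
def pozycja_nastepnej_samogloski (s : String) (start : Int) : Int :=
  match (PySem.List.pyRange start (s.toList.length : Int)).find?
      (fun i => pvIsVowel ((PySem.List.pyGet? s.toList i).getD ' ')) with
  | some i => i
  | none => -1

-- bounds of the found position, needed for liczba_pociec's termination
theorem pozycja_bounds (s : String) (start : Int) :
    pozycja_nastepnej_samogloski s start = -1 ∨
      (start ≤ pozycja_nastepnej_samogloski s start ∧
        pozycja_nastepnej_samogloski s start < (s.toList.length : Int)) := by
  unfold pozycja_nastepnej_samogloski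
  cases h : (PySem.List.pyRange start (s.toList.length : Int)).find?
      (fun i => pvIsVowel ((PySem.List.pyGet? s.toList i).getD ' ')) with
  | none => exact Or.inl rfl
  | some i =>
      have hm := List.mem_of_find?_eq_some h
      exact Or.inr (PySem.List.mem_pyRange_one.mp hm)

def liczba_pociec (s : String) (start : Int) : Int :=
  if h0 : start = 0 then
    let p1 := pozycja_nastepnej_samogloski s start
    if h1 : p1 < 0 then 0
    else
      let p2 := pozycja_nastepnej_samogloski s (p1 + 1)
      if h2 : p2 < 0 then 0
      else (p2 - p1) * liczba_pociec s p2
  else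
    let p := pozycja_nastepnej_samogloski s (start + 1)
    if hp : p < 0 then 1
    else (p - start) * liczba_pociec s p
termination_by ((s.toList.length : Int) + 1 - start).toNat
decreasing_by
  · have hd : pozycja_nastepnej_samogloski s (p1 + 1) =
        pozycja_nastepnej_samogloski s (pozycja_nastepnej_samogloski s start + 1) := rfl
    rcases pozycja_bounds s (p1 + 1) with h | h <;> omega
  · rcases pozycja_bounds s (start + 1) with h | h <;> omega

-- ===== PORT B =====
def liczba_pociec_alt (s : String) (start : Int) : Int :=
  let lo : Int := if start = 0 then 0 else start + 1
  let positions := (PySem.List.pyRange lo (s.toList.length : Int)).filter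
      (fun i => pvIsVowel ((PySem.List.pyGet? s.toList i).getD ' '))
  if start = 0 then
    match positions with
    | [] => 0
    | [_] => 0
    | p0 :: rest =>
        (rest.foldl (fun ac p => (ac.1 * (p - ac.2), p)) ((1 : Int), p0)).1
  else
    match positions with
    | [] => 1
    | _ =>
        (positions.foldl (fun ac p => (ac.1 * (p - ac.2), p)) ((1 : Int), start)).1

-- ===== PRECONDITION & SPEC =====
-- Pre_ restricts to the natural domain start ≥ 0: a negative start makes A scan Python
-- negative indices (wraparound, and IndexError when start+1 < -len(s)), accidental
-- behaviour of A's implementation that B does not reproduce.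
def Pre_liczba_pociec (s : String) (start : Int) : Prop := 0 ≤ start
instance (s : String) (start : Int) : Decidable (Pre_liczba_pociec s start) := by
  unfold Pre_liczba_pociec; infer_instance

def pvWitness_liczba_pociec : String × Int := ("ala ma kota", 0)

def Spec_liczba_pociec (s : String) (start : Int) (out : Int) : Prop := out = liczba_pociec_alt s start
instance (s : String) (start : Int) (out : Int) : Decidable (Spec_liczba_pociec s start out) := by unfold Spec_liczba_pociec; infer_instance

-- ===== CLAIM (what is proved, stated in full; the proofs are below) =====
def Claim_equal_liczba_pociec : Prop := ∀ (s : String) (start : Int), Dom_liczba_pociec s start → Pre_liczba_pociec s start → Spec_liczba_pociec s start (liczba_pociec s start)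

-- ===== LEMMAS AND PROOFS =====

-- the list of vowel positions of s at indices ≥ t (syntactically the filter both ports use)
def pvPos (s : String) (t : Int) : List Int :=
  (PySem.List.pyRange t (s.toList.length : Int)).filter
    (fun i => pvIsVowel ((PySem.List.pyGet? s.toList i).getD ' '))

theorem pozycja_eq_head (s : String) (t : Int) :
    pozycja_nastepnej_samogloski s t =
      match pvPos s t with
      | [] => -1
      | p :: _ => p := by
  unfold pozycja_nastepnej_samogloski pvPos
  rw [Eq.symm List.head?_filter]
  cases (PySem.List.pyRange t (s.toList.length : Int)).filter
      (fun i => pvIsVowel ((PySem.List.pyGet? s.toList i).getD ' ')) <;> simp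

theorem pvPos_cons (s : String) (a p : Int) (rest : List Int)
    (h : pvPos s a = p :: rest) :
    a ≤ p ∧ p < (s.toList.length : Int) ∧ rest = pvPos s (p + 1) := by
  have hlt : a < (s.toList.length : Int) := by
    by_contra hge
    rw [pvPos, PySem.List.pyRange_one_eq_nil (by omega)] at h
    simp at h
  induction hn : ((s.toList.length : Int) - a).toNat generalizing a with
  | zero => omega
  | succ n ih =>
      rw [pvPos, PySem.List.pyRange_one_cons hlt, List.filter_cons] at h
      by_cases hv : pvIsVowel ((PySem.List.pyGet? s.toList a).getD ' ') = true
      · rw [if_pos hv] at h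
        obtain ⟨rfl, rfl⟩ := List.cons.inj h
        exact ⟨le_refl _, hlt, rfl⟩
      · rw [if_neg hv] at h
        by_cases hlt' : a + 1 < (s.toList.length : Int)
        · have := ih (a + 1) h hlt' (by omega)
          exact ⟨by omega, this.2.1, this.2.2⟩
        · rw [PySem.List.pyRange_one_eq_nil (by omega)] at h
          simp at h

-- factoring a constant out of the gap-product fold
theorem pv_foldl_factor (l : List Int) (c a prev : Int) :
    (l.foldl (fun ac p => (ac.1 * (p - ac.2), p)) (c * a, prev)).1 =
      c * (l.foldl (fun ac p => (ac.1 * (p - ac.2), p)) (a, prev)).1 := by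
  induction l generalizing a prev with
  | nil => simp
  | cons p t ih =>
      simp only [List.foldl_cons]
      rw [mul_assoc, ih]

-- A on a nonzero (positive) start is the gap product over pvPos s (t+1) starting at prev = t
theorem A_else (s : String) (t : Int) (ht : 1 ≤ t) :
    liczba_pociec s t =
      ((pvPos s (t + 1)).foldl (fun ac p => (ac.1 * (p - ac.2), p)) ((1 : Int), t)).1 := by
  rw [liczba_pociec, dif_neg (by omega : ¬ t = 0)]
  have hh := pozycja_eq_head s (t + 1)
  cases hp : pvPos s (t + 1) with
  | nil =>
      rw [hp] at hh
      simp only [hh]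
      norm_num
  | cons p rest =>
      rw [hp] at hh
      obtain ⟨h1, h2, h3⟩ := pvPos_cons s (t + 1) p rest hp
      simp only [hh]
      rw [dif_neg (by omega : ¬ p < 0)]
      rw [A_else s p (by omega), List.foldl_cons, ← h3]
      have : (1 : Int) * (p - t) = (p - t) * 1 := by ring
      rw [this, pv_foldl_factor]
termination_by ((s.toList.length : Int) + 1 - t).toNat
decreasing_by omega

theorem alt_zero (s : String) :
    liczba_pociec_alt s 0 =
      (match pvPos s 0 with
      | [] => 0
      | [_] => 0
      | p0 :: rest => (rest.foldl (fun ac p => (ac.1 * (p - ac.2), p)) ((1 : Int), p0)).1) := by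
  unfold liczba_pociec_alt pvPos
  norm_num

theorem alt_pos (s : String) (start : Int) (h : ¬ start = 0) :
    liczba_pociec_alt s start =
      (match pvPos s (start + 1) with
      | [] => 1
      | _ => ((pvPos s (start + 1)).foldl (fun ac p => (ac.1 * (p - ac.2), p)) ((1 : Int), start)).1) := by
  unfold liczba_pociec_alt pvPos
  simp only [if_neg h]

-- ===== VERDICT (by name: the statement is the Claim_ definition above) =====
theorem liczba_pociec_spec : Claim_equal_liczba_pociec := by
  intro s start _ hpre
  unfold Spec_liczba_pociec
  by_cases h0 : start = 0
  · subst h0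
    rw [alt_zero, liczba_pociec, dif_pos rfl]
    have hh1 := pozycja_eq_head s 0
    cases hp : pvPos s 0 with
    | nil =>
        rw [hp] at hh1
        simp only [hh1]
        norm_num
    | cons p1 rest =>
        rw [hp] at hh1
        obtain ⟨hb1, hb2, hb3⟩ := pvPos_cons s 0 p1 rest hp
        simp only [hh1]
        rw [dif_neg (by omega : ¬ p1 < 0)]
        have hh2 := pozycja_eq_head s (p1 + 1)
        rw [← hb3] at hh2
        cases hr : rest with
        | nil =>
            rw [hr] at hh2
            simp only [hh2]
            norm_num
        | cons p2 rest2 =>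
            rw [hr] at hh2
            rw [hr] at hb3
            obtain ⟨hc1, hc2, hc3⟩ := pvPos_cons s (p1 + 1) p2 rest2 hb3.symm
            simp only [hh2]
            rw [dif_neg (by omega : ¬ p2 < 0)]
            rw [A_else s p2 (by omega), ← hc3, List.foldl_cons]
            have h1 : (1 : Int) * (p2 - p1) = (p2 - p1) * 1 := by ring
            rw [h1, pv_foldl_factor]
  · have h1 : 1 ≤ start := by
      unfold Pre_liczba_pociec at hpre; omega
    rw [alt_pos s start h0, A_else s start h1]
    cases hp : pvPos s (start + 1) with
    | nil => simp
    | cons p rest => rfl
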